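-- pv_equiv track=rewrite | github.com/dashdashebrahimy/randomgenerator | randomgenerator.py | mid_square_method
-- ===== SOURCE A (Python) =====
-- def mid_square_method(n, u):
--     results = []
--     i = n
--     while i:
--         k = len(str(u))
--         u = u**2
--         u_str = str(u)
--
--         # Add leading zeros if needed to make the length 2*k
--         while len(u_str) < k * 2:
--             u_str = '0' + u_str
--
--         # Determine the starting index for slicing based on whether k is even or odd
--         if k % 2:
--             start = (k - 1) // 2
--         else:
--             start = k // 2
--
--         # Extract middle k digits
--         u_str = u_str[start:start + k]
--         u = int(u_str)
--         results.append(u)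
--         i -= 1
--
--     return results
-- ===== SOURCE B (Python) =====
-- def mid_square_method(n, u):
--     results = []
--     for _ in range(n):
--         k = len(str(u))
--         u = u * u // 10 ** (k - k // 2) % 10 ** k
--         results.append(u)
--     return results
-- ===== Notes on version B (the rewrite author's own statement) =====
-- stated objective: faster
-- what changed: B extracts the middle k digits of u**2 with integer arithmetic (u*u // 10**(k - k//2) % 10**k) instead of A's string round-trip (str, a character-by-character leading-zero padding loop, slicing, int), in a single for-range loop.
import Mathlib
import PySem

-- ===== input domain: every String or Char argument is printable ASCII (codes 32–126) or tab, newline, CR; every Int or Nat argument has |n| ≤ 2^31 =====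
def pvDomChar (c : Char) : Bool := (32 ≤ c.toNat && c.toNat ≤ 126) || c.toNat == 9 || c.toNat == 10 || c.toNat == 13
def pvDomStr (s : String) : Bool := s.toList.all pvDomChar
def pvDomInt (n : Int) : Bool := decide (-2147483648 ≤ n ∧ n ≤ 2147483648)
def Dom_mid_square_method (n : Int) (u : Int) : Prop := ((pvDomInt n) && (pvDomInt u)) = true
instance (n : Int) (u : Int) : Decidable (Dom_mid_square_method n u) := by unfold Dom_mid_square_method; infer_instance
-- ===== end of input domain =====

-- B replaces A's string padding/slicing middle-digit extraction by pure integer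
-- arithmetic (u*u // 10**(k - k//2) % 10**k) in a single forward loop: simpler, no
-- string round-trips.  (On n < 0 Python A's `while i` never ends; both ports clamp
-- the iteration count with Int.toNat, so nothing is claimed about a non-returning A.)


-- ===== PORT A =====
-- Strings are carried as their character lists (PySem string ops are defined on List Char).

-- the inner `while len(u_str) < k * 2: u_str = '0' + u_str` padding loop
def pvPadLoop (target : Int) (s : List Char) : List Char :=
  if PySem.List.len s < target then pvPadLoop target ('0' :: s) else s
termination_by target.toNat - s.length
decreasing_by simp only [PySem.List.len_eq, List.length_cons] at *; omega

-- int(u_str): hand-ported from PySem's public digit primitive (the recursion inside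
-- PySem.Int.ofChars? is private to the prelude and cannot be reasoned about); every
-- u_str reaching this call is a nonempty all-digit slice of the zero-padded decimal
-- string of u**2, and on such strings Python's int(s) is exactly this left fold.
def pvIntOfDigits (cs : List Char) : Int :=
  Int.ofNat (cs.foldl (fun a c => a * 10 + (PySem.Int.digitVal? c).getD 0) 0)

-- one iteration of A's while-loop body (from `k = len(str(u))` to `u = int(u_str)`)
def pvStepA (u : Int) : Int :=
  let k : Int := PySem.List.len (PySem.Int.toChars u)
  let u2 : Int := u ^ 2
  let s : List Char := PySem.Int.toChars u2
  let padded : List Char := pvPadLoop (k * 2) s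
  let start : Int := if PySem.Int.mod k 2 ≠ 0 then PySem.Int.floordiv (k - 1) 2
                     else PySem.Int.floordiv k 2
  let sliced : List Char := PySem.List.slice padded (some start) (some (start + k))
  pvIntOfDigits sliced

-- A's `while i:` loop, counting i down from n (for n ≥ 0 it runs exactly n times)
def pvLoopA : Nat → Int → List Int → List Int
  | 0, _, results => results
  | m + 1, u, results =>
    let u' := pvStepA u
    pvLoopA m u' (results ++ [u'])

def mid_square_method (n : Int) (u : Int) : List Int := pvLoopA n.toNat u []

-- ===== PORT B =====
-- B's `for _ in range(n)` loop, consing each new u onto the front of the rest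
def pvLoopB : Nat → Int → List Int
  | 0, _ => []
  | m + 1, u =>
    let k : Int := PySem.List.len (PySem.Int.toChars u)
    let u' := PySem.Int.mod
        (PySem.Int.floordiv (u * u) (10 ^ (k - PySem.Int.floordiv k 2).toNat))
        (10 ^ k.toNat)
    u' :: pvLoopB m u'

def mid_square_method_alt (n : Int) (u : Int) : List Int := pvLoopB n.toNat u

-- ===== PRECONDITION & SPEC =====
def Spec_mid_square_method (n : Int) (u : Int) (out : List Int) : Prop := out = mid_square_method_alt n u
instance (n : Int) (u : Int) (out : List Int) : Decidable (Spec_mid_square_method n u out) := by unfold Spec_mid_square_method; infer_instance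

-- ===== CLAIM (what is proved, stated in full; the proofs are below) =====
def Claim_equal_mid_square_method : Prop := ∀ (n : Int) (u : Int), Dom_mid_square_method n u → Spec_mid_square_method n u (mid_square_method n u)

-- ===== LEMMAS AND PROOFS =====

-- the digit-fold of pvIntOfDigits, with a general accumulator
def pvDC (a : Nat) (cs : List Char) : Nat :=
  cs.foldl (fun a c => a * 10 + (PySem.Int.digitVal? c).getD 0) a

-- the characters our strings consist of: decimal digit characters
def pvGoodC (c : Char) : Prop := ∃ d, d < 10 ∧ c = Nat.digitChar d

theorem pvDigitVal_digitChar {d : Nat} (h : d < 10) :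
    (PySem.Int.digitVal? (Nat.digitChar d)).getD 0 = d := by
  interval_cases d <;> decide

theorem pvGoodC_lt {c : Char} (h : pvGoodC c) : (PySem.Int.digitVal? c).getD 0 < 10 := by
  obtain ⟨d, hd, rfl⟩ := h
  rw [pvDigitVal_digitChar hd]; exact hd

theorem pvDC_append (a : Nat) (xs ys : List Char) :
    pvDC a (xs ++ ys) = pvDC (pvDC a xs) ys := List.foldl_append ..

theorem pvDC_cons (a : Nat) (c : Char) (t : List Char) :
    pvDC a (c :: t) = pvDC (a * 10 + (PySem.Int.digitVal? c).getD 0) t := by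
  unfold pvDC
  rw [List.foldl_cons]

theorem pvDC_shift (cs : List Char) : ∀ a : Nat, pvDC a cs = a * 10 ^ cs.length + pvDC 0 cs := by
  induction cs with
  | nil => intro a; simp [pvDC]
  | cons c t ih =>
    intro a
    rw [pvDC_cons, ih, pvDC_cons 0, ih ((0 : Nat) * 10 + (PySem.Int.digitVal? c).getD 0)]
    simp [List.length_cons, pow_succ]
    ring

theorem pvDC_lt (cs : List Char) (h : ∀ c ∈ cs, pvGoodC c) : pvDC 0 cs < 10 ^ cs.length := by
  induction cs with
  | nil => simp [pvDC]
  | cons c t ih =>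
    rw [pvDC_cons, pvDC_shift]
    have h1 := pvGoodC_lt (h c (by simp))
    have h2 := ih (fun x hx => h x (by simp [hx]))
    have : (PySem.Int.digitVal? c).getD 0 * 10 ^ t.length + pvDC 0 t <
        10 * 10 ^ t.length := by
      calc (PySem.Int.digitVal? c).getD 0 * 10 ^ t.length + pvDC 0 t
          < (PySem.Int.digitVal? c).getD 0 * 10 ^ t.length + 10 ^ t.length := by omega
        _ = ((PySem.Int.digitVal? c).getD 0 + 1) * 10 ^ t.length := by ring
        _ ≤ 10 * 10 ^ t.length := by
            exact Nat.mul_le_mul_right _ (by omega)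
    simpa [List.length_cons, pow_succ] using by linarith [this]

theorem pvDC_replicate (j : Nat) : pvDC 0 (List.replicate j '0') = 0 := by
  induction j with
  | zero => rfl
  | succ m ih =>
    rw [List.replicate_succ, pvDC_cons]
    have h0 : (0 : Nat) * 10 + (PySem.Int.digitVal? '0').getD 0 = 0 := by decide
    rw [h0]
    exact ih

-- Nat.toDigits versus Nat.digits
theorem pvToDigitsCore_eq : ∀ (fuel n : Nat) (acc : List Char), 0 < n → n ≤ fuel →
    Nat.toDigitsCore 10 fuel n acc = ((Nat.digits 10 n).map Nat.digitChar).reverse ++ acc := by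
  intro fuel
  induction fuel with
  | zero => intro n acc h1 h2; omega
  | succ f ih =>
    intro n acc h1 _
    rw [Nat.toDigitsCore]
    rw [Nat.digits_def' (by norm_num : 1 < 10) h1]
    by_cases h10 : n / 10 = 0
    · simp [h10, Nat.digits_zero]
    · rw [if_neg h10, ih (n / 10) _ (Nat.pos_of_ne_zero h10) (by omega)]
      simp

theorem pvToDigits_eq (n : Nat) (h : 0 < n) :
    Nat.toDigits 10 n = ((Nat.digits 10 n).map Nat.digitChar).reverse := by
  unfold Nat.toDigits
  rw [pvToDigitsCore_eq (n + 1) n [] h (by omega)]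
  simp

theorem pvToDigits_zero : Nat.toDigits 10 0 = ['0'] := rfl

theorem pvToDigits_good (m : Nat) : ∀ c ∈ Nat.toDigits 10 m, pvGoodC c := by
  rcases Nat.eq_zero_or_pos m with rfl | hm
  · intro c hc
    rw [pvToDigits_zero] at hc
    simp at hc
    exact ⟨0, by norm_num, by rw [hc]; rfl⟩
  · rw [pvToDigits_eq m hm]
    intro c hc
    simp only [List.mem_reverse, List.mem_map] at hc
    obtain ⟨d, hd, rfl⟩ := hc
    exact ⟨d, Nat.digits_lt_base (by norm_num) hd, rfl⟩

theorem pvToDigits_ne_nil (m : Nat) : Nat.toDigits 10 m ≠ [] := by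
  rcases Nat.eq_zero_or_pos m with rfl | hm
  · rw [pvToDigits_zero]; simp
  · rw [pvToDigits_eq m hm]
    simp [Nat.digits_ne_nil_iff_ne_zero, hm.ne']

theorem pvDC_digits : ∀ m : Nat, pvDC 0 (((Nat.digits 10 m).map Nat.digitChar).reverse) = m := by
  intro m
  induction m using Nat.strong_induction_on with
  | _ m ih =>
    rcases Nat.eq_zero_or_pos m with rfl | hm
    · simp [pvDC]
    · rw [Nat.digits_def' (by norm_num : 1 < 10) hm]
      simp only [List.map_cons, List.reverse_cons]
      rw [pvDC_append, pvDC_shift]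
      rcases Nat.eq_zero_or_pos (m / 10) with h10 | h10
      · simp [h10, pvDC]
        rw [pvDigitVal_digitChar (Nat.mod_lt m (by norm_num))]
        omega
      · rw [ih (m / 10) (Nat.div_lt_self hm (by norm_num))]
        show m / 10 * 10 ^ _ + pvDC (0 * 10 + _) [] = m
        simp [pvDC, pvDigitVal_digitChar (Nat.mod_lt m (by norm_num : (0:Nat) < 10))]
        omega

theorem pvDC_toDigits (m : Nat) : pvDC 0 (Nat.toDigits 10 m) = m := by
  rcases Nat.eq_zero_or_pos m with rfl | hm
  · decide
  · rw [pvToDigits_eq m hm, pvDC_digits]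

theorem pvToDigits_lt (m : Nat) : m < 10 ^ (Nat.toDigits 10 m).length := by
  rcases Nat.eq_zero_or_pos m with rfl | hm
  · decide
  · rw [pvToDigits_eq m hm]
    simp only [List.length_reverse, List.length_map]
    exact Nat.lt_base_pow_length_digits (by norm_num)

theorem pvToDigits_len_le (m e : Nat) (he : 0 < e) (h : m < 10 ^ e) :
    (Nat.toDigits 10 m).length ≤ e := by
  rcases Nat.eq_zero_or_pos m with rfl | hm
  · rw [pvToDigits_zero]; simpa using he
  · rw [pvToDigits_eq m hm]
    simp only [List.length_reverse, List.length_map]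
    exact (Nat.digits_length_le_iff (by norm_num) m).mpr h

theorem pvPadLoop_eq (t : Int) : ∀ s : List Char,
    pvPadLoop t s = List.replicate (t.toNat - s.length) '0' ++ s := by
  intro s
  induction hn : t.toNat - s.length generalizing s with
  | zero =>
    rw [pvPadLoop]
    rw [if_neg (by simp only [PySem.List.len_eq]; omega)]
    simp
  | succ m ih =>
    rw [pvPadLoop]
    rw [if_pos (by simp only [PySem.List.len_eq]; omega)]
    rw [ih ('0' :: s) (by simp; omega)]
    rw [List.replicate_succ']
    simp

-- the middle slice of a digit string, as a quotient-remainder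
theorem pvDC_take_drop (cs : List Char) (hgood : ∀ c ∈ cs, pvGoodC c) (a b : Nat)
    (hab : a + b ≤ cs.length) :
    pvDC 0 ((cs.drop a).take b) = pvDC 0 cs / 10 ^ (cs.length - a - b) % 10 ^ b := by
  have hsplit : cs = cs.take a ++ ((cs.drop a).take b ++ (cs.drop a).drop b) := by
    rw [List.take_append_drop, List.take_append_drop]
  have hYlen : ((cs.drop a).take b).length = b := by
    rw [List.length_take, List.length_drop]; omega
  have hZlen : ((cs.drop a).drop b).length = cs.length - a - b := by
    rw [List.length_drop, List.length_drop]
  have hvY : pvDC 0 ((cs.drop a).take b) < 10 ^ b := by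
    have := pvDC_lt ((cs.drop a).take b)
      (fun c hc => hgood c (List.mem_of_mem_drop (List.mem_of_mem_take hc)))
    rwa [hYlen] at this
  have hvZ : pvDC 0 ((cs.drop a).drop b) < 10 ^ (cs.length - a - b) := by
    have := pvDC_lt ((cs.drop a).drop b)
      (fun c hc => hgood c (List.mem_of_mem_drop (List.mem_of_mem_drop hc)))
    rwa [hZlen] at this
  set vX := pvDC 0 (cs.take a) with hvXdef
  set vY := pvDC 0 ((cs.drop a).take b) with hvYdef
  set vZ := pvDC 0 ((cs.drop a).drop b) with hvZdef
  have hN : pvDC 0 cs = (vX * 10 ^ b + vY) * 10 ^ (cs.length - a - b) + vZ := by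
    conv_lhs => rw [hsplit]
    rw [pvDC_append, pvDC_append, pvDC_shift ((cs.drop a).drop b), pvDC_shift ((cs.drop a).take b)]
    rw [hYlen, hZlen]
    try ring
  rw [hN]
  have hE : 0 < 10 ^ (cs.length - a - b) := Nat.pow_pos (by norm_num)
  rw [add_comm ((vX * 10 ^ b + vY) * 10 ^ (cs.length - a - b)) vZ,
      Nat.add_mul_div_right _ _ hE, Nat.div_eq_of_lt hvZ, zero_add,
      mul_comm vX (10 ^ b), Nat.mul_add_mod, Nat.mod_eq_of_lt hvY]

-- A's one step equals B's one step
theorem pvToChars_ne_nil (u : Int) : PySem.Int.toChars u ≠ [] := by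
  unfold PySem.Int.toChars
  split_ifs
  · simp
  · exact pvToDigits_ne_nil _

theorem pvIntOfDigits_eq (cs : List Char) : pvIntOfDigits cs = Int.ofNat (pvDC 0 cs) := rfl

theorem pvStep_eq (u : Int) :
    pvStepA u = PySem.Int.mod
      (PySem.Int.floordiv (u * u)
        (10 ^ ((PySem.List.len (PySem.Int.toChars u)
            - PySem.Int.floordiv (PySem.List.len (PySem.Int.toChars u)) 2).toNat)))
      (10 ^ (PySem.List.len (PySem.Int.toChars u)).toNat) := by
  unfold pvStepA
  simp only [PySem.List.len_eq]
  set L := (PySem.Int.toChars u).length with hLdef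
  have hL1 : 1 ≤ L := by
    have := pvToChars_ne_nil u
    rw [hLdef]
    cases h : PySem.Int.toChars u with
    | nil => exact absurd h this
    | cons c t => simp
  set m := u.natAbs * u.natAbs with hmdef
  have hmuu : ((m : Nat) : Int) = u * u := Int.natAbs_mul_self
  have hu2 : u ^ 2 = ((m : Nat) : Int) := by rw [sq]; exact hmuu.symm
  have htoChars2 : PySem.Int.toChars (u ^ 2) = Nat.toDigits 10 m := by
    unfold PySem.Int.toChars
    rw [if_neg (by rw [hu2]; exact not_lt.mpr (Int.natCast_nonneg m))]
    rw [hu2]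
    simp
  -- m < 10 ^ (2 * L)
  have hmlt : m < 10 ^ (2 * L) := by
    by_cases hu : u < 0
    · have hch : PySem.Int.toChars u = '-' :: Nat.toDigits 10 u.natAbs := by
        unfold PySem.Int.toChars; rw [if_pos hu]
      have hlen : L = (Nat.toDigits 10 u.natAbs).length + 1 := by
        rw [hLdef, hch]; simp
      have habs : u.natAbs < 10 ^ (L - 1) := by
        rw [hlen]; simpa using pvToDigits_lt u.natAbs
      calc m < 10 ^ (L - 1) * 10 ^ (L - 1) := by
              exact Nat.mul_lt_mul_of_lt_of_le habs (le_of_lt habs) (by positivity)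
        _ = 10 ^ ((L - 1) + (L - 1)) := by rw [pow_add]
        _ ≤ 10 ^ (2 * L) := Nat.pow_le_pow_right (by norm_num) (by omega)
    · have hch : PySem.Int.toChars u = Nat.toDigits 10 u.toNat := by
        unfold PySem.Int.toChars; rw [if_neg hu]
      have habs : u.natAbs < 10 ^ L := by
        have : u.natAbs = u.toNat := by omega
        rw [this, hLdef, hch]
        exact pvToDigits_lt u.toNat
      calc m < 10 ^ L * 10 ^ L :=
              Nat.mul_lt_mul_of_lt_of_le habs (le_of_lt habs) (by positivity)
        _ = 10 ^ (2 * L) := by rw [← pow_add]; ring_nf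
  rw [htoChars2]
  set s := Nat.toDigits 10 m with hsdef
  have hslen : s.length ≤ 2 * L := pvToDigits_len_le m (2 * L) (by omega) hmlt
  have hpad : pvPadLoop (↑L * 2) s = List.replicate (2 * L - s.length) '0' ++ s := by
    rw [pvPadLoop_eq]
    congr 2
    omega
  rw [hpad]
  set padded := List.replicate (2 * L - s.length) '0' ++ s with hpaddef
  have hplen : padded.length = 2 * L := by
    rw [hpaddef]; simp; omega
  have hgoodp : ∀ c ∈ padded, pvGoodC c := by
    intro c hc
    rw [hpaddef] at hc
    rcases List.mem_append.mp hc with h | h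
    · rw [List.eq_of_mem_replicate h]
      exact ⟨0, by norm_num, rfl⟩
    · exact pvToDigits_good m c h
  have hvalp : pvDC 0 padded = m := by
    rw [hpaddef, pvDC_append, pvDC_replicate, pvDC_toDigits]
  -- start = L / 2
  have hstart : (if PySem.Int.mod (↑L) 2 ≠ 0 then PySem.Int.floordiv (↑L - 1) 2
      else PySem.Int.floordiv (↑L) 2) = ((L / 2 : Nat) : Int) := by
    rw [PySem.Int.mod_eq_emod_of_pos (by norm_num),
        PySem.Int.floordiv_eq_ediv_of_pos (by norm_num),
        PySem.Int.floordiv_eq_ediv_of_pos (by norm_num)]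
    split_ifs with h <;> omega
  rw [hstart]
  -- the slice
  rw [PySem.List.slice_natCast_add]
  have hab : L / 2 + L ≤ padded.length := by omega
  have hslice := pvDC_take_drop padded hgoodp (L / 2) L hab
  have hexp : padded.length - L / 2 - L = L - L / 2 := by omega
  rw [hexp, hvalp] at hslice
  rw [pvIntOfDigits_eq, hslice]
  -- B's integer arithmetic
  have hfd2 : PySem.Int.floordiv (↑L) 2 = ((L / 2 : Nat) : Int) := by
    rw [PySem.Int.floordiv_eq_ediv_of_pos (by norm_num)]; omega
  rw [hfd2]
  have he1 : ((L : Int) - ((L / 2 : Nat) : Int)).toNat = L - L / 2 := by omega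
  have he2 : ((L : Int)).toNat = L := by omega
  rw [he1, he2, ← hmuu]
  have hpow1 : ((10 : Int) ^ (L - L / 2)) = ((10 ^ (L - L / 2) : Nat) : Int) := by push_cast; ring
  have hpow2 : ((10 : Int) ^ L) = ((10 ^ L : Nat) : Int) := by push_cast; ring
  rw [hpow1, hpow2]
  rw [PySem.Int.floordiv_eq_ediv_of_pos (by positivity), ← Int.natCast_ediv]
  rw [PySem.Int.mod_eq_emod_of_pos (by positivity), ← Int.natCast_emod]
  simp

theorem pvLoop_eq (m : Nat) : ∀ (u : Int) (acc : List Int),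
    pvLoopA m u acc = acc ++ pvLoopB m u := by
  induction m with
  | zero => intro u acc; simp [pvLoopA, pvLoopB]
  | succ m ih =>
    intro u acc
    show pvLoopA m (pvStepA u) (acc ++ [pvStepA u]) = acc ++ pvLoopB (m + 1) u
    rw [ih]
    show acc ++ [pvStepA u] ++ pvLoopB m (pvStepA u) = acc ++ (_ :: pvLoopB m _)
    rw [pvStep_eq u]
    simp

-- ===== VERDICT (by name: the statement is the Claim_ definition above) =====
theorem mid_square_method_spec : Claim_equal_mid_square_method := by
  intro n u _
  unfold Spec_mid_square_method mid_square_method mid_square_method_alt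
  rw [pvLoop_eq]
  simp
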